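-- pv_equiv track=rewrite | github.com/Chanchan2/algorithm-study | programmers/JadenCase 문자열 만들기.py | solution
-- ===== SOURCE A (Python) =====
-- def solution(s):
--     letter_list = list(s.lower())
--     for i in range(len(letter_list)) :
--         if i == 0 or s[i-1] == ' ' :
--             if s[i].isalpha() :
--                 letter_list[i] = letter_list[i].upper()
--     answer = ''.join(letter_list)
--     return answer
-- ===== SOURCE B (Python) =====
-- def solution(s):
--     words = s.lower().split(' ')
--     return ' '.join(w[:1].upper() + w[1:] for w in words)
-- ===== Notes on version B (the rewrite author's own statement) =====
-- stated objective: idiomatic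
-- what changed: Replaces the index loop that mutates a prebuilt char list while looking back at the previous source character by a staged pipeline: lower the string, split it on single spaces, capitalise each word's first character via slicing, and join the words back; the isalpha guard is dropped since upper() is the identity on non-letters.
import Mathlib
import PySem

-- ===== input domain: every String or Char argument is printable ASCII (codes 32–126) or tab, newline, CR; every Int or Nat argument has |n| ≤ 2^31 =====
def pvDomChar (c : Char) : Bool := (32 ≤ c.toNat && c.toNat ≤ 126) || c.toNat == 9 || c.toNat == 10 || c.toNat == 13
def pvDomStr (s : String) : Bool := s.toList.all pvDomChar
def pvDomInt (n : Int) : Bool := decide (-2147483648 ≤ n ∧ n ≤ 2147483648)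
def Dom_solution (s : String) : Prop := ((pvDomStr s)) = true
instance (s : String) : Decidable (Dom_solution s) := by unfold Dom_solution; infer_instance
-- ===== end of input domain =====

-- B replaces A's index loop (in-place mutation of list(s.lower()) guarded by s[i-1]==' ' and isalpha)
-- by a staged split(' ') / per-word capitalisation / ' '.join pipeline; same return value, no mutation.

-- ===== PORT A =====
-- loop body of A's `for i in range(len(letter_list))`; the pyGetD defaults are never read:
-- i ∈ [0, len) and s[i-1] is only consulted when i ≠ 0 (Python's short-circuit `or`).
def aBody (sl : List Char) (ll : List Char) (i : Int) : List Char :=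
  if i == 0 || PySem.List.pyGetD sl (i - 1) ' ' == ' ' then
    if PySem.Chars.isalpha (PySem.List.pyGetD sl i ' ') then
      ll.set i.toNat (PySem.Chars.upperChar (PySem.List.pyGetD ll i ' '))
    else ll
  else ll

def solution (s : String) : String :=
  let sl := s.toList
  let letterList := (PySem.Str.lower s).toList
  let letterList := (PySem.List.pyRange 0 (letterList.length : Int)).foldl (aBody sl) letterList
  String.ofList letterList

-- ===== PORT B =====
-- w[:1].upper() + w[1:] on an (already lowered) word
def capWord (w : List Char) : List Char :=
  PySem.Chars.upper (PySem.List.slice w none (some 1)) ++ PySem.List.slice w (some 1) none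

-- ' '.join(capWord(w) for w in s.lower().split(' '))
def solution_alt (s : String) : String :=
  let words := PySem.Chars.splitOn (PySem.Str.lower s).toList [' ']
  String.ofList (PySem.Chars.join [' '] (words.map capWord))

-- ===== PRECONDITION & SPEC =====
def Spec_solution (s : String) (out : String) : Prop := out = solution_alt s
instance (s : String) (out : String) : Decidable (Spec_solution s out) := by unfold Spec_solution; infer_instance

-- ===== CLAIM (what is proved, stated in full; the proofs are below) =====
def Claim_equal_solution : Prop := ∀ (s : String), Dom_solution s → Spec_solution s (solution s)

-- ===== LEMMAS AND PROOFS =====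

def mySplit : List Char → List (List Char)
  | [] => [[]]
  | c :: r =>
    if c = ' ' then [] :: mySplit r
    else match mySplit r with
      | [] => [[c]]
      | h :: t => (c :: h) :: t

lemma mySplit_ne_nil (cs : List Char) : mySplit cs ≠ [] := by
  cases cs with
  | nil => simp [mySplit]
  | cons c r =>
    unfold mySplit
    split_ifs
    · simp
    · cases mySplit r <;> simp

def modHead (p : List Char) : List (List Char) → List (List Char)
  | [] => []
  | h :: t => (p ++ h) :: t

lemma splitOn_go_eq (fuel : Nat) : ∀ (l cur : List Char) (acc2 : List (List Char)),
    l.length ≤ fuel →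
    PySem.Chars.splitOn.go [' '] fuel l cur acc2 =
      acc2.reverse ++ modHead cur.reverse (mySplit l) := by
  induction fuel with
  | zero =>
    intro l cur acc2 h
    have : l = [] := List.length_eq_zero_iff.mp (Nat.le_zero.mp h)
    subst this
    simp [PySem.Chars.splitOn.go, mySplit, modHead]
  | succ f ih =>
    intro l cur acc2 h
    cases l with
    | nil => simp [PySem.Chars.splitOn.go, mySplit, modHead]
    | cons c rest =>
      rw [PySem.Chars.splitOn.go]
      by_cases hc : c = ' '
      · subst hc
        have hpre : [' '].isPrefixOf (' ' :: rest) = true := by simp [List.isPrefixOf]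
        rw [if_pos hpre]
        simp only [List.length_singleton, List.drop_one, List.tail_cons]
        rw [ih rest [] ((cur.reverse) :: acc2) (by simpa using Nat.le_of_succ_le_succ h)]
        simp [mySplit]
        cases hms : mySplit rest with
        | nil => exact absurd hms (mySplit_ne_nil rest)
        | cons hh tt => simp [modHead]
      · have hpre : [' '].isPrefixOf (c :: rest) = false := by
          simp [List.isPrefixOf]
          exact fun hcc => absurd hcc.symm hc
        rw [if_neg (by simp [hpre])]
        rw [ih rest (c :: cur) acc2 (by simpa using Nat.le_of_succ_le_succ h)]
        have : mySplit (c :: rest) = match mySplit rest with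
          | [] => [[c]] | h :: t => (c :: h) :: t := by
          rw [mySplit]; rw [if_neg hc]
        rw [this]
        cases hms : mySplit rest with
        | nil => exact absurd hms (mySplit_ne_nil rest)
        | cons hh tt => simp [modHead]

lemma splitOn_eq_mySplit (cs : List Char) :
    PySem.Chars.splitOn cs [' '] = mySplit cs := by
  rw [PySem.Chars.splitOn, splitOn_go_eq (cs.length + 1) cs [] [] (by omega)]
  cases hms : mySplit cs with
  | nil => exact absurd hms (mySplit_ne_nil cs)
  | cons hh tt => simp [modHead]

lemma capWord_nil : capWord [] = [] := by decide

lemma capWord_cons (c : Char) (r : List Char) :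
    capWord (c :: r) = PySem.Chars.upperChar c :: r := by
  have h1 : PySem.List.slice (c :: r) none (some 1) = [c] := by
    rw [PySem.List.slice_to]
    · simp
    · norm_num
  have h2 : PySem.List.slice (c :: r) (some 1) none = r := by
    rw [PySem.List.slice_from]
    · simp
    · norm_num
  rw [capWord, h1, h2]
  simp [PySem.Chars.upper]

-- word-start flag pass: proof-side normal form shared by both sides
def jadenGo : Bool → List Char → List Char
  | _, [] => []
  | start, c :: cs => (if start then PySem.Chars.upperChar c else c) :: jadenGo (c == ' ') cs

lemma join_map_mySplit (cs : List Char) :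
    (PySem.Chars.join [' '] ((mySplit cs).map capWord) = jadenGo true cs) ∧
    (∀ h t, mySplit cs = h :: t →
      PySem.Chars.join [' '] (h :: t.map capWord) = jadenGo false cs) := by
  induction cs with
  | nil =>
    constructor
    · simp [mySplit, capWord_nil, jadenGo, PySem.Chars.join_singleton]
    · intro h t hms
      simp [mySplit] at hms
      obtain ⟨rfl, rfl⟩ := hms
      simp [jadenGo, PySem.Chars.join_singleton]
  | cons c r ih =>
    obtain ⟨ih1, ih2⟩ := ih
    by_cases hc : c = ' '
    · subst hc
      have hms : mySplit (' ' :: r) = [] :: mySplit r := by rw [mySplit]; simp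
      have hgo : ∀ b, jadenGo b (' ' :: r) = (if b then PySem.Chars.upperChar ' ' else ' ') :: jadenGo true r := by
        intro b; rw [jadenGo]; simp
      have hup : PySem.Chars.upperChar ' ' = ' ' := by decide
      obtain ⟨hh, tt, hms'⟩ : ∃ hh tt, mySplit r = hh :: tt := by
        cases hmsr : mySplit r with
        | nil => exact absurd hmsr (mySplit_ne_nil r)
        | cons a b => exact ⟨a, b, rfl⟩
      constructor
      · have hmc : capWord hh :: tt.map capWord = (mySplit r).map capWord := by
          rw [hms']; rfl
        rw [hms, List.map_cons, capWord_nil, hms', List.map_cons,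
          PySem.Chars.join_cons_cons, hgo, hup, hmc, ih1]
        simp
      · intro h t hmt
        rw [hms] at hmt
        obtain ⟨rfl, rfl⟩ := List.cons_eq_cons.mp hmt
        have hmc : capWord hh :: tt.map capWord = (mySplit r).map capWord := by
          rw [hms']; rfl
        rw [hms', List.map_cons, PySem.Chars.join_cons_cons, hmc, ih1, hgo, hup]
        simp
    · obtain ⟨hh, tt, hms'⟩ : ∃ hh tt, mySplit r = hh :: tt := by
        cases hmsr : mySplit r with
        | nil => exact absurd hmsr (mySplit_ne_nil r)
        | cons a b => exact ⟨a, b, rfl⟩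
      have hms : mySplit (c :: r) = (c :: hh) :: tt := by
        rw [mySplit]; rw [if_neg hc, hms']
      have hgo : ∀ b, jadenGo b (c :: r) = (if b then PySem.Chars.upperChar c else c) :: jadenGo false r := by
        intro b
        have hcc : (c == ' ') = false := by simp [hc]
        rw [jadenGo, hcc]
      have hjoin2 : PySem.Chars.join [' '] (hh :: tt.map capWord) = jadenGo false r :=
        ih2 hh tt hms'
      constructor
      · rw [hms, List.map_cons, capWord_cons, hgo]
        cases tt with
        | nil =>
          simp only [List.map_nil, PySem.Chars.join_singleton] at hjoin2 ⊢
          rw [← hjoin2]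
          simp
        | cons t1 ts =>
          rw [List.map_cons, PySem.Chars.join_cons_cons] at hjoin2 ⊢
          rw [← hjoin2]
          simp
      · intro h t hmt
        rw [hms] at hmt
        obtain ⟨rfl, rfl⟩ := List.cons_eq_cons.mp hmt
        rw [hgo]
        cases tt with
        | nil =>
          simp only [List.map_nil, PySem.Chars.join_singleton] at hjoin2 ⊢
          rw [← hjoin2]
          simp
        | cons t1 ts =>
          rw [List.map_cons, PySem.Chars.join_cons_cons] at hjoin2 ⊢
          rw [← hjoin2]
          simp

-- what both programs compute at position j of s
def gch (c : Char) : Char := PySem.Chars.upperChar (PySem.Chars.lowerChar c)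

def specC (sl : List Char) (j : Nat) : Char :=
  if (if j = 0 then true else (sl[j-1]! == ' ')) then gch sl[j]! else PySem.Chars.lowerChar sl[j]!

lemma isupper_bounds (c : Char) (h : PySem.Chars.isupper c = true) :
    65 ≤ c.toNat ∧ c.toNat ≤ 90 := by
  simp [PySem.Chars.isupper, Char.le_def] at h
  obtain ⟨h1, h2⟩ := h
  rw [UInt32.le_iff_toNat_le] at h1 h2
  exact ⟨h1, h2⟩

lemma lower_beq_space (c : Char) : (PySem.Chars.lowerChar c == ' ') = (c == ' ') := by
  by_cases hu : PySem.Chars.isupper c = true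
  · obtain ⟨h1, h2⟩ := isupper_bounds c hu
    have hl : PySem.Chars.lowerChar c = Char.ofNat (c.toNat + 32) := by
      simp [PySem.Chars.lowerChar, hu]
    have hne : PySem.Chars.lowerChar c ≠ ' ' := by
      rw [hl]
      intro hc
      have h3 : (Char.ofNat (c.toNat + 32)).toNat = ' '.toNat := by rw [hc]
      rw [Char.toNat_ofNat] at h3
      have hv : (c.toNat + 32).isValidChar := by unfold Nat.isValidChar; left; omega
      simp [hv] at h3
      omega
    have hne2 : c ≠ ' ' := by
      intro hc; rw [hc] at h1; simp [Char.toNat] at h1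
    simp [hne, hne2]
  · simp [PySem.Chars.lowerChar, hu]

lemma gch_nonalpha (c : Char) (h : PySem.Chars.isalpha c = false) :
    gch c = PySem.Chars.lowerChar c := by
  simp [PySem.Chars.isalpha] at h
  simp [gch, PySem.Chars.lowerChar, PySem.Chars.upperChar, h.1, h.2]

lemma lower_eq_map_range (sl : List Char) :
    PySem.Chars.lower sl = (List.range sl.length).map (fun j => PySem.Chars.lowerChar sl[j]!) := by
  apply List.ext_getElem
  · simp [PySem.Chars.lower]
  · intro j hj hj'
    have hjl : j < sl.length := by simpa [PySem.Chars.lower] using hj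
    simp only [PySem.Chars.lower, List.getElem_map, List.getElem_range]
    rw [getElem!_pos sl j hjl]

lemma jadenGo_spec (sl : List Char) (flag : Bool) :
    jadenGo flag (PySem.Chars.lower sl) =
    (List.range sl.length).map
      (fun j => if (if j = 0 then flag else (sl[j-1]! == ' ')) then gch sl[j]!
                else PySem.Chars.lowerChar sl[j]!) := by
  induction sl generalizing flag with
  | nil => simp [PySem.Chars.lower, jadenGo]
  | cons c rest ih =>
    have hcons : PySem.Chars.lower (c :: rest) = PySem.Chars.lowerChar c :: PySem.Chars.lower rest := by
      simp [PySem.Chars.lower]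
    rw [hcons, jadenGo, lower_beq_space, ih (c == ' ')]
    rw [List.length_cons, List.range_succ_eq_map, List.map_cons, List.map_map]
    refine List.cons_eq_cons.mpr ⟨?_, ?_⟩
    · cases flag <;> simp [gch]
    · apply List.map_congr_left
      intro j _
      rcases j with _ | k
      · simp
      · simp

lemma A_loop (sl : List Char) (m : Nat) (hm : m ≤ sl.length) :
    (PySem.List.pyRange 0 (m : Int)).foldl (aBody sl) (PySem.Chars.lower sl) =
    (List.range sl.length).map
      (fun j => if j < m then specC sl j else PySem.Chars.lowerChar sl[j]!) := by
  induction m with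
  | zero =>
    rw [show PySem.List.pyRange 0 ((0:Nat) : Int) = [] by simp [PySem.List.pyRange]]
    simpa using lower_eq_map_range sl
  | succ k ih =>
    have hk : k ≤ sl.length := Nat.le_of_succ_le hm
    have hklt : k < sl.length := hm
    have hsplit : PySem.List.pyRange 0 ((k+1 : Nat) : Int) =
        PySem.List.pyRange 0 (k : Int) ++ [(k : Int)] := by
      rw [PySem.List.pyRange_one_append 0 (k : Int) ((k+1 : Nat) : Int) (by positivity) (by push_cast; omega)]
      congr 1
      rw [PySem.List.pyRange_one_cons (by push_cast; omega)]
      rw [show ((k : Int) + 1) = ((k+1 : Nat) : Int) by push_cast; ring]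
      simp [PySem.List.pyRange]
    rw [hsplit, List.foldl_append, ih hk]
    set prev := (List.range sl.length).map
      (fun j => if j < k then specC sl j else PySem.Chars.lowerChar sl[j]!) with hprev
    have hplen : prev.length = sl.length := by simp [hprev]
    have hpk : prev[k]! = PySem.Chars.lowerChar sl[k]! := by
      rw [getElem!_pos prev k (by omega)]
      simp [hprev]
    -- evaluate the condition of aBody at i = k
    have hcond : (((k : Int)) == 0 || PySem.List.pyGetD sl ((k : Int) - 1) ' ' == ' ')
        = (if k = 0 then true else (sl[k-1]! == ' ')) := by
      rcases k with _ | k'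
      · simp
      · have h1 : ((((k'+1 : Nat) : Int)) == 0) = false := by simp; omega
        have h2 : ((k'+1 : Nat) : Int) - 1 = ((k' : Nat) : Int) := by push_cast; ring
        rw [h1, h2, PySem.List.pyGetD_natCast]
        have hk' : k' < sl.length := by omega
        rw [List.getD_eq_getElem sl ' ' hk', ← getElem!_pos sl k' hk']
        simp
    have hget : PySem.List.pyGetD sl ((k : Int)) ' ' = sl[k]! := by
      rw [PySem.List.pyGetD_natCast, List.getD_eq_getElem sl ' ' hklt, ← getElem!_pos sl k hklt]
    have hgetll : PySem.List.pyGetD prev ((k : Int)) ' ' = prev[k]! := by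
      rw [PySem.List.pyGetD_natCast, List.getD_eq_getElem prev ' ' (by omega),
        ← getElem!_pos prev k (by omega)]
    -- now case on the condition and the isalpha guard
    simp only [List.foldl_cons, List.foldl_nil]
    unfold aBody
    rw [hcond, hget, hgetll, hpk]
    simp only [Int.toNat_natCast]
    cases hB : (if k = 0 then true else (sl[k-1]! == ' ')) with
    | false =>
      rw [if_neg (by simp)]
      rw [hprev]
      apply List.map_congr_left
      intro j hj
      by_cases hjk : j = k
      · subst hjk
        have hs : specC sl j = PySem.Chars.lowerChar sl[j]! := by
          unfold specC; rw [hB, if_neg (by simp)]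
        rw [if_neg (by omega), if_pos (by omega), hs]
      · by_cases hlt : j < k
        · rw [if_pos hlt, if_pos (by omega)]
        · rw [if_neg hlt, if_neg (by omega)]
    | true =>
      rw [if_pos rfl]
      cases hA : PySem.Chars.isalpha sl[k]! with
      | false =>
        rw [if_neg (by simp)]
        rw [hprev]
        apply List.map_congr_left
        intro j hj
        by_cases hjk : j = k
        · subst hjk
          have hs : specC sl j = PySem.Chars.lowerChar sl[j]! := by
            unfold specC; rw [hB, if_pos rfl]; exact gch_nonalpha _ hA
          rw [if_neg (by omega), if_pos (by omega), hs]
        · by_cases hlt : j < k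
          · rw [if_pos hlt, if_pos (by omega)]
          · rw [if_neg hlt, if_neg (by omega)]
      | true =>
        rw [if_pos rfl]
        have hgch : PySem.Chars.upperChar (PySem.Chars.lowerChar sl[k]!) = gch sl[k]! := rfl
        rw [hgch]
        apply List.ext_getElem
        · simp [hprev]
        · intro j hj1 hj2
          have hj' : j < sl.length := by
            have := hj1; rw [List.length_set, hplen] at this; exact this
          rw [List.getElem_map]
          simp only [List.getElem_range]
          by_cases hjk : j = k
          · subst hjk
            rw [List.getElem_set_self]
            have hs : specC sl j = gch sl[j]! := by unfold specC; rw [hB, if_pos rfl]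
            rw [if_pos (by omega), hs]
          · rw [List.getElem_set_ne (by omega)]
            have hpj : prev[j] = if j < k then specC sl j else PySem.Chars.lowerChar sl[j]! := by
              simp [hprev]
            rw [hpj]
            by_cases hlt : j < k
            · rw [if_pos hlt, if_pos (by omega)]
            · rw [if_neg hlt, if_neg (by omega)]

lemma key (s : String) : solution s = solution_alt s := by
  show String.ofList
      ((PySem.List.pyRange 0 ((PySem.Str.lower s).toList.length : Int)).foldl
        (aBody s.toList) (PySem.Str.lower s).toList)
    = String.ofList (PySem.Chars.join [' ']
        ((PySem.Chars.splitOn (PySem.Str.lower s).toList [' ']).map capWord))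
  rw [PySem.Str.toList_lower, splitOn_eq_mySplit,
    (join_map_mySplit (PySem.Chars.lower s.toList)).1]
  have hlen : (PySem.Chars.lower s.toList).length = s.toList.length := by
    simp [PySem.Chars.lower]
  rw [hlen, A_loop s.toList s.toList.length le_rfl, jadenGo_spec s.toList true]
  congr 1
  apply List.map_congr_left
  intro j hj
  have hjl : j < s.toList.length := List.mem_range.mp hj
  rw [if_pos hjl]
  unfold specC
  rfl

-- ===== VERDICT (by name: the statement is the Claim_ definition above) =====
theorem solution_spec : Claim_equal_solution := by
  intro s _
  unfold Spec_solution
  exact key s
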